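-- pv_equiv track=rewrite | github.com/jng0820/Algorithm_practice | programmers/hash_2.py | solution
-- ===== SOURCE A (Python) =====
-- from operator import eq
--
-- def solution(phone_book):
--     phone_book.sort()
--     answer = False
--     for i in range(len(phone_book)-1):
--         if(answer == True):
--             break
--         for j in range(i+1,len(phone_book)):
--             if(len(phone_book[i]) > len(phone_book[j])):
--                 continue
--             else:
--                 book = phone_book[j][0:len(phone_book[i])]
--                 answer = eq(book,phone_book[i])
--                 if(answer == True):
--                     break
--     return not answer
-- ===== SOURCE B (Python) =====
-- def solution(phone_book):
--     phone_book.sort()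
--     for a, b in zip(phone_book, phone_book[1:]):
--         if b.startswith(a):
--             return False
--     return True
-- ===== Notes on version B (the rewrite author's own statement) =====
-- stated objective: alternative
-- what changed: Replaced the all-pairs prefix scan after sorting (worst-case O(n^2) comparisons) by a single pass over adjacent pairs of the sorted list, using the fact that in sorted order a prefix relation always appears between neighbours; on typical inputs both are dominated by the sort, so no speed is claimed.
import Mathlib
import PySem

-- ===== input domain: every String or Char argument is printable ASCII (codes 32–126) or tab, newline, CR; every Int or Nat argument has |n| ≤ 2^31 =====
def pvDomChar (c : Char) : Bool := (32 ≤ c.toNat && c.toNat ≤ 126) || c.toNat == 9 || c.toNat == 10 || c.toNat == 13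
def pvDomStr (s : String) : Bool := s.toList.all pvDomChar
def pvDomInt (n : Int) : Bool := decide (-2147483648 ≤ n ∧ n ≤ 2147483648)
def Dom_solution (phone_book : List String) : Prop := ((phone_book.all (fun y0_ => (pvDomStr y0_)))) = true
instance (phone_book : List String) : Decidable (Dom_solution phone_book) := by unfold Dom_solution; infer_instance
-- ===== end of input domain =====

-- B replaces A's all-pairs prefix scan over the sorted list by a single pass over
-- adjacent pairs of the sorted list. Both A and B sort phone_book in place (Python
-- list.sort); the equivalence proved here is about the return value.

-- ===== PORT A =====
-- inner loop 'for j in range(i+1, len(phone_book))' with the threaded 'answer' flag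
def solInnerA (si : String) : List String → Bool → Bool
  | [], ans => ans
  | t :: rest, ans =>
    if PySem.Str.len si > PySem.Str.len t then
      -- 'continue'
      solInnerA si rest ans
    else
      -- book = phone_book[j][0:len(phone_book[i])]; answer = eq(book, phone_book[i])
      let book := PySem.Str.slice t (some 0) (some (PySem.Str.len si))
      let ans' := book == si
      if ans' then ans' else solInnerA si rest ans'

-- outer loop 'for i in range(len(phone_book)-1)' with the 'if answer: break' check
-- (answer is always False when the inner loop starts)
def solOuterA : List String → Bool
  | [] => false
  | x :: rest =>
    let ans := solInnerA x rest false
    if ans then ans else solOuterA rest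

def solution (phone_book : List String) : Bool :=
  !(solOuterA (PySem.List.sorted phone_book (fun s => s)))

-- ===== PORT B =====
-- 'for a, b in zip(phone_book, phone_book[1:]): if b.startswith(a): return False'
def adjScanB : List String → Bool
  | x :: y :: rest =>
    if PySem.Str.startswith y x then false else adjScanB (y :: rest)
  | _ => true

def solution_alt (phone_book : List String) : Bool :=
  adjScanB (PySem.List.sorted phone_book (fun s => s))

-- ===== PRECONDITION & SPEC =====
def Spec_solution (phone_book : List String) (out : Bool) : Prop := out = solution_alt phone_book
instance (phone_book : List String) (out : Bool) : Decidable (Spec_solution phone_book out) := by unfold Spec_solution; infer_instance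

-- ===== CLAIM (what is proved, stated in full; the proofs are below) =====
def Claim_equal_solution : Prop := ∀ (phone_book : List String), Dom_solution phone_book → Spec_solution phone_book (solution phone_book)

-- ===== LEMMAS AND PROOFS =====

-- Lexicographic sandwich: if l < m < u (lexicographically) and l is a prefix of u,
-- then l is a prefix of m.
theorem lex_sandwich (l : List Char) : ∀ (m u : List Char),
    List.Lex (· < ·) l m → List.Lex (· < ·) m u → l <+: u → l <+: m := by
  induction l with
  | nil => intro m u _ _ _; exact List.nil_prefix
  | cons a l' ih =>
    intro m u h1 h2 hp
    cases u with
    | nil => simp at hp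
    | cons b' u' =>
      rw [List.cons_prefix_cons] at hp
      obtain ⟨rfl, hp'⟩ := hp
      cases h1 with
      | cons h1' =>
        cases h2 with
        | cons h2' => exact List.cons_prefix_cons.mpr ⟨rfl, ih _ _ h1' h2' hp'⟩
        | rel hr => exact absurd hr (lt_irrefl _)
      | rel hr =>
        cases h2 with
        | cons h2' => exact absurd hr (lt_irrefl _)
        | rel hr2 => exact absurd (hr.trans hr2) (lt_irrefl _)

-- the same sandwich for Python's (= Lean's) string order
theorem le_sandwich (l m u : String) (h1 : l ≤ m) (h2 : m ≤ u)
    (hp : l.toList <+: u.toList) : l.toList <+: m.toList := by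
  rw [String.le_iff_toList_le] at h1 h2
  rcases lt_or_eq_of_le h1 with h1 | h1
  · rcases lt_or_eq_of_le h2 with h2 | h2
    · exact lex_sandwich _ _ _ h1 h2 hp
    · rw [h2]; exact hp
  · rw [h1]

-- A's inner loop decides 'si is a prefix of some later element'
theorem solInnerA_eq (si : String) (rest : List String) :
    solInnerA si rest false = rest.any (fun t => decide (si.toList <+: t.toList)) := by
  induction rest with
  | nil => rfl
  | cons t rest ih =>
    by_cases hlen : PySem.Str.len si > PySem.Str.len t
    · have hnp : ¬ (si.toList <+: t.toList) := by
        intro h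
        have := h.length_le
        rw [PySem.Str.len_eq, PySem.Str.len_eq] at hlen
        omega
      simp only [solInnerA, if_pos hlen, List.any_cons, ih, hnp, decide_false,
        Bool.false_or]
    · have hb : (PySem.Str.slice t (some 0) (some (PySem.Str.len si)) == si)
          = decide (si.toList <+: t.toList) := by
        have htl : (PySem.Str.slice t (some 0) (some (PySem.Str.len si))).toList
            = t.toList.take si.toList.length := by
          rw [PySem.Str.toList_slice, PySem.Chars.slice_eq_listSlice,
              PySem.List.slice_zero_start, PySem.Str.len_eq,
              PySem.List.slice_to _ (by positivity)]
          simp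
        rw [Bool.eq_iff_iff, beq_iff_eq, decide_eq_true_eq, List.prefix_iff_eq_take]
        constructor
        · intro h
          have h2 := congrArg String.toList h
          rw [htl] at h2
          exact h2.symm
        · intro h
          apply String.toList_inj.mp
          rw [htl, ← h]
      cases hd : decide (si.toList <+: t.toList) with
      | true => simp only [solInnerA, if_neg hlen, hb, hd, if_pos, List.any_cons,
          Bool.true_or]
      | false => simp only [solInnerA, if_neg hlen, hb, hd, List.any_cons, ih,
          Bool.false_or, if_neg Bool.false_ne_true]

theorem solOuterA_cons (x : String) (rest : List String) :
    solOuterA (x :: rest) =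
      ((rest.any fun t => decide (x.toList <+: t.toList)) || solOuterA rest) := by
  show (let ans := solInnerA x rest false; if ans then ans else solOuterA rest) = _
  rw [solInnerA_eq]
  cases h : rest.any fun t => decide (x.toList <+: t.toList) with
  | true => simp
  | false => simp

theorem adjScanB_cons (x y : String) (rest : List String) :
    adjScanB (x :: y :: rest) =
      (if PySem.Str.startswith y x then false else adjScanB (y :: rest)) := rfl

-- on a ≤-sorted list, A's all-pairs scan agrees with B's adjacent-pair scan
theorem outer_eq_adj (t : List String) (h : t.Pairwise (· ≤ ·)) :
    solOuterA t = !adjScanB t := by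
  induction t with
  | nil => rfl
  | cons x rest ih =>
    cases rest with
    | nil => rfl
    | cons y rest2 =>
      rw [List.pairwise_cons] at h
      obtain ⟨hx, h2⟩ := h
      have ihy := ih h2
      have hsw : PySem.Str.startswith y x = decide (x.toList <+: y.toList) := by
        rw [PySem.Str.startswith_eq, Bool.eq_iff_iff, PySem.Chars.startswith_iff,
          decide_eq_true_eq]
      rw [solOuterA_cons, adjScanB_cons, hsw]
      cases hxy : decide (x.toList <+: y.toList) with
      | true => simp [List.any_cons, hxy]
      | false =>
        have hrest : rest2.any (fun z => decide (x.toList <+: z.toList)) = false := by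
          rw [List.any_eq_false]
          intro z hz
          simp only [decide_eq_true_eq]
          intro hpz
          have h2' := List.pairwise_cons.mp h2
          have : x.toList <+: y.toList :=
            le_sandwich x y z (hx y (by simp)) (h2'.1 z hz) hpz
          simp [this] at hxy
        simp [List.any_cons, hxy, hrest, ihy]

-- ===== VERDICT (by name: the statement is the Claim_ definition above) =====
theorem solution_spec : Claim_equal_solution := by
  intro pb _
  unfold Spec_solution solution solution_alt
  rw [outer_eq_adj _ (PySem.List.sorted_pairwise pb (fun s => s)), Bool.not_not]
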